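-- pv_equiv track=rewrite | github.com/dlwnsgud8406/mysolved | programmers/level1/부족한 금액 계산하기.py | solution
-- ===== SOURCE A (Python) =====
-- def solution(price, money, count):
--     answer = -1
--     needed_money = 0
--     for i in range(1, count+1):
--         needed_money += (i * price)
--     if needed_money <= money:
--         return 0
--     else:
--         return needed_money - money
-- ===== SOURCE B (Python) =====
-- def solution(price, money, count):
--     n = count if count > 0 else 0
--     needed = price * n * (n + 1) // 2
--     shortfall = needed - money
--     return shortfall if shortfall > 0 else 0
-- ===== Notes on version B (the rewrite author's own statement) =====
-- stated objective: faster
-- what changed: Replaced the O(count) summation loop with the closed-form Gauss sum price*count*(count+1)//2 and a max-with-zero clamp.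
import Mathlib
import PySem

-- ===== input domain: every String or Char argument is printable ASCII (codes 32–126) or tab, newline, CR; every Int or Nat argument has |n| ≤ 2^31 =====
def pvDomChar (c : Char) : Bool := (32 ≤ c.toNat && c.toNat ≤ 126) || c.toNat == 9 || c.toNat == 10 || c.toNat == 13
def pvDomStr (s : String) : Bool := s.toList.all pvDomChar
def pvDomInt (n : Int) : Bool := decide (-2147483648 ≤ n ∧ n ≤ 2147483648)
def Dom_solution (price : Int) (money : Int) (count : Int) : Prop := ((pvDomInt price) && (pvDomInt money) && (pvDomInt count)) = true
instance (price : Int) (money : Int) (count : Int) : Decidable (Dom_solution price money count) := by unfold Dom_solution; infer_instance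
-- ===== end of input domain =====

-- B replaces A's O(count) summation loop by the closed-form Gauss sum (O(1)).

-- ===== PORT A =====
-- literal port: answer = -1 is dead in A and kept nowhere; the loop accumulates needed_money
def solution (price : Int) (money : Int) (count : Int) : Int :=
  let needed_money := (PySem.List.pyRange 1 (count + 1) 1).foldl (fun acc i => acc + i * price) 0
  if needed_money ≤ money then 0 else needed_money - money

-- ===== PORT B =====
def solution_alt (price : Int) (money : Int) (count : Int) : Int :=
  let n := if count > 0 then count else 0
  let needed := PySem.Int.floordiv (price * n * (n + 1)) 2
  let shortfall := needed - money
  if shortfall > 0 then shortfall else 0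

-- ===== PRECONDITION & SPEC =====
def Spec_solution (price : Int) (money : Int) (count : Int) (out : Int) : Prop := out = solution_alt price money count
instance (price : Int) (money : Int) (count : Int) (out : Int) : Decidable (Spec_solution price money count out) := by unfold Spec_solution; infer_instance

-- ===== CLAIM (what is proved, stated in full; the proofs are below) =====
def Claim_equal_solution : Prop := ∀ (price : Int) (money : Int) (count : Int), Dom_solution price money count → Spec_solution price money count (solution price money count)

-- ===== LEMMAS AND PROOFS =====

-- doubled Gauss sum for A's loop, over range(1, n+1)
lemma pv_loop_sum (price : Int) (n : Nat) :
    2 * ((PySem.List.pyRange 1 ((n : Int) + 1) 1).foldl (fun acc i => acc + i * price) 0)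
      = price * (n : Int) * ((n : Int) + 1) := by
  induction n with
  | zero => rw [PySem.List.pyRange_one_eq_nil (by omega)]; simp
  | succ m ih =>
    have h : PySem.List.pyRange 1 ((m : Int) + 1 + 1) 1
        = PySem.List.pyRange 1 ((m : Int) + 1) 1 ++ [(m : Int) + 1] := by
      exact PySem.List.pyRange_one_succ_right (by omega)
    push_cast
    rw [h, List.foldl_append]
    simp only [List.foldl]
    push_cast at ih
    ring_nf
    ring_nf at ih
    omega

lemma pv_needed_closed (price : Int) (count : Int) :
    (PySem.List.pyRange 1 (count + 1) 1).foldl (fun acc i => acc + i * price) 0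
      = PySem.Int.floordiv (price * (if count > 0 then count else 0) * ((if count > 0 then count else 0) + 1)) 2 := by
  by_cases hc : count > 0
  · simp only [hc, if_pos]
    obtain ⟨n, rfl⟩ : ∃ n : Nat, count = (n : Int) := ⟨count.toNat, (Int.toNat_of_nonneg (by omega)).symm⟩
    have h := pv_loop_sum price n
    rw [PySem.Int.floordiv_eq_ediv_of_pos (by omega), ← h]
    omega
  · simp only [hc, if_false]
    rw [PySem.List.pyRange_one_eq_nil (by omega)]
    simp [PySem.Int.floordiv]

-- ===== VERDICT (by name: the statement is the Claim_ definition above) =====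
theorem solution_spec : Claim_equal_solution := by
  intro price money count _
  unfold Spec_solution solution solution_alt
  dsimp only
  rw [pv_needed_closed]
  split_ifs <;> omega
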